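-- pv_equiv track=rewrite | github.com/RasaHQ/paraphraser | paraphraser/modelling/utils.py | make_subword_penalties
-- ===== SOURCE A (Python) =====
-- from collections import defaultdict
--
-- def make_subword_penalties(line):
--     """
--     prefix: n-grams of subwords (n=1,2,3,4)
--     penalize: the next subword
--     """
--     penalties = defaultdict(list)
--     toks = line.replace("<pad>", "").split()
--     for prefix_len in (0, 1, 2, 3):
--         for ii in range(len(toks) - prefix_len):
--             prefix = toks[ii : ii + prefix_len]
--             next_word = toks[ii + prefix_len]
--             penalties[tuple(prefix)].append((next_word, len(prefix)))
--
--     return penalties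
-- ===== SOURCE B (Python) =====
-- from collections import defaultdict
--
-- def make_subword_penalties(line):
--     """
--     prefix: n-grams of subwords (n=1,2,3,4)
--     penalize: the next subword
--     """
--     toks = line.replace("<pad>", "").split()
--     n = len(toks)
--     penalties = defaultdict(list)
--     for L in (0, 1, 2, 3):
--         grams = [tuple(toks[j - L:j]) for j in range(L, n)]
--         for g in dict.fromkeys(grams):
--             penalties[g] = [(toks[j], L) for j in range(L, n) if tuple(toks[j - L:j]) == g]
--     return penalties
-- ===== Notes on version B (the rewrite author's own statement) =====
-- stated objective: alternative
-- what changed: A accumulates incrementally, appending (next_word, len) pairs one position at a time into a growing defaultdict; B is a declarative group-by: per prefix length it first dedups the list of n-gram keys (dict.fromkeys) and then builds each key's whole value list in one independent filtering scan, assigning it once.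
import Mathlib
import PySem

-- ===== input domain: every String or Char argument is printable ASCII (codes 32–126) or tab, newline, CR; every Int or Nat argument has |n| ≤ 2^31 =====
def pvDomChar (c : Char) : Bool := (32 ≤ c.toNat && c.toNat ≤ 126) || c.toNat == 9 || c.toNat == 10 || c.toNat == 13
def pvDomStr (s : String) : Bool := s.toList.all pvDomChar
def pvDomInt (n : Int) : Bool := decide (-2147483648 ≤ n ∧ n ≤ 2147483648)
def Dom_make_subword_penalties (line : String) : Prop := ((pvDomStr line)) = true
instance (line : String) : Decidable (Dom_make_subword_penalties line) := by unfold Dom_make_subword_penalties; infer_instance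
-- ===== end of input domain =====

-- B replaces A's incremental append-into-a-mutable-dict accumulation with a declarative
-- group-by: per prefix length it dedups the key list and builds each value list by an
-- independent filtering scan (objective: alternative).

-- ===== PORT A =====
-- A's four passes: for prefix_len in (0,1,2,3): for ii in range(len(toks)-prefix_len): append.
-- toks[ii+prefix_len] is always in range here, so pyGetD with a dummy default is exact.
def make_subword_penalties (line : String) : List (List String × List (String × Int)) :=
  let toks := PySem.Str.split₀ (PySem.Str.replace line "<pad>" "")
  let penalties := [(0 : Int), 1, 2, 3].foldl
    (fun (d : PySem.Dict (List String) (List (String × Int))) prefix_len =>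
      (PySem.List.pyRange 0 ((toks.length : Int) - prefix_len) 1).foldl
        (fun d ii =>
          let pfx := PySem.List.slice toks (some ii) (some (ii + prefix_len))
          let next_word := PySem.List.pyGetD toks (ii + prefix_len) ""
          d.modify pfx [] (· ++ [(next_word, (pfx.length : Int))]))
        d)
    PySem.Dict.empty
  penalties.items

-- ===== PORT B =====
-- B's group-by: for each L, grams = [toks[j-L:j] for j in range(L,n)]; for each g in
-- dict.fromkeys(grams) (= PySem.List.dedup, first occurrences): penalties[g] is assigned the
-- comprehension [(toks[j], L) for j in range(L,n) if toks[j-L:j] == g] (filter + map).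
-- toks[j] is always in range here, so pyGetD with a dummy default is exact.
def make_subword_penalties_alt (line : String) : List (List String × List (String × Int)) :=
  let toks := PySem.Str.split₀ (PySem.Str.replace line "<pad>" "")
  let n : Int := (toks.length : Int)
  let penalties := [(0 : Int), 1, 2, 3].foldl
    (fun (d : PySem.Dict (List String) (List (String × Int))) L =>
      let grams := (PySem.List.pyRange L n 1).map
        (fun j => PySem.List.slice toks (some (j - L)) (some j))
      (PySem.List.dedup grams).foldl
        (fun d g => d.insert g
          (((PySem.List.pyRange L n 1).filter
              (fun j => PySem.List.slice toks (some (j - L)) (some j) == g)).map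
            (fun j => (PySem.List.pyGetD toks j "", L))))
        d)
    PySem.Dict.empty
  penalties.items

-- ===== PRECONDITION & SPEC =====
def Spec_make_subword_penalties (line : String) (out : List (List String × List (String × Int))) : Prop := out = make_subword_penalties_alt line
instance (line : String) (out : List (List String × List (String × Int))) : Decidable (Spec_make_subword_penalties line out) := by unfold Spec_make_subword_penalties; infer_instance

-- ===== CLAIM (what is proved, stated in full; the proofs are below) =====
def Claim_equal_make_subword_penalties : Prop := ∀ (line : String), Dom_make_subword_penalties line → Spec_make_subword_penalties line (make_subword_penalties line)

-- ===== LEMMAS AND PROOFS =====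

abbrev pvDS := PySem.Dict (List String) (List (String × Int))
abbrev pvKV := List String × (String × Int)

def pvStep (d : pvDS) (p : pvKV) : pvDS := d.modify p.1 [] (· ++ [p.2])

/-- The (key, appended value) pairs contributed by prefix length `L`, in A's pass-`L` order. -/
def pvPairs (toks : List String) (L : Nat) : List pvKV :=
  (List.range (toks.length - L)).map
    (fun ii => ((toks.drop ii).take L, (toks.getD (ii + L) "", (L : Int))))

/-- The full pass-`L` dict of A. -/
def pvP (toks : List String) (L : Nat) : pvDS := (pvPairs toks L).foldl pvStep PySem.Dict.empty

/-- The pass-`L` block of items: B's group-by shape. -/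
def pvBlk (toks : List String) (L : Nat) : List (List String × List (String × Int)) :=
  (PySem.List.dedup ((pvPairs toks L).map Prod.fst)).map
    (fun g => (g, ((pvPairs toks L).filter (fun p => p.1 == g)).map Prod.snd))

def pvOut (toks : List String) : List (List String × List (String × Int)) :=
  pvBlk toks 0 ++ pvBlk toks 1 ++ pvBlk toks 2 ++ pvBlk toks 3

lemma pvKeyLen (toks : List String) (L : Nat) :
    ∀ p ∈ pvPairs toks L, p.1.length = L := by
  intro p hp
  unfold pvPairs at hp
  obtain ⟨ii, hii, rfl⟩ := List.mem_map.mp hp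
  have : ii < toks.length - L := List.mem_range.mp hii
  simp only [List.length_take, List.length_drop]
  omega

lemma pvBlk_keys_len (toks : List String) (L : Nat) :
    ∀ k ∈ (pvBlk toks L).map Prod.fst, k.length = L := by
  intro k hk
  unfold pvBlk at hk
  rw [List.map_map] at hk
  obtain ⟨g, hg, rfl⟩ := List.mem_map.mp hk
  obtain ⟨p, hp, rfl⟩ := List.mem_map.mp ((PySem.List.mem_dedup _ _).mp hg)
  exact pvKeyLen toks L p hp

lemma pvKeysLen_of_items (u : pvDS) (toks : List String) (Ms : List Nat)
    (hu : u.items = (Ms.map (fun M => pvBlk toks M)).flatten) :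
    ∀ k ∈ u.keys, ∃ M ∈ Ms, k.length = M := by
  intro k hk
  have hk' : k ∈ u.items.map Prod.fst := hk
  rw [hu] at hk'
  obtain ⟨p, hp, rfl⟩ := List.mem_map.mp hk'
  rw [List.mem_flatten] at hp
  obtain ⟨l, hl, hpl⟩ := hp
  obtain ⟨M, hM, rfl⟩ := List.mem_map.mp hl
  exact ⟨M, hM, pvBlk_keys_len toks M _ (List.mem_map_of_mem hpl)⟩

-- ---------- A side ----------

lemma pvP_keys_nodup (toks : List String) (L : Nat) : (pvP toks L).keys.Nodup := by
  unfold pvP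
  rw [show pvStep = (fun (d : pvDS) (x : pvKV) =>
        d.modify x.1 [] ((fun (_ : pvDS) (x : pvKV) => (· ++ [x.2])) d x)) from rfl]
  exact PySem.Dict.nodup_keys_foldl_modify_key _ _ _ _ _ (by simp [PySem.Dict.keys_empty])

/-- A's pass-`L` dict has exactly B's group-by items. -/
lemma pvP_items (toks : List String) (L : Nat) : (pvP toks L).items = pvBlk toks L := by
  rw [PySem.Dict.items_eq_map_keys _ (pvP_keys_nodup toks L) []]
  have hkeys : (pvP toks L).keys = PySem.List.dedup ((pvPairs toks L).map Prod.fst) := by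
    unfold pvP
    rw [show pvStep = (fun (d : pvDS) (x : pvKV) =>
          d.modify x.1 [] ((fun (_ : pvDS) (x : pvKV) => (· ++ [x.2])) d x)) from rfl]
    rw [PySem.Dict.keys_foldl_modify_key, PySem.List.dedup_eq_ofList]
    rfl
  rw [hkeys]
  unfold pvBlk
  apply List.map_congr_left
  intro g _
  have hgetD : (pvP toks L).getD g [] =
      ((pvPairs toks L).filter (fun p => p.1 == g)).map Prod.snd := by
    unfold pvP
    rw [show pvStep = (fun (d : pvDS) (p : pvKV) => d.modify p.1 [] (fun x => x ++ [p.2]))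
      from rfl]
    rw [PySem.Dict.getD_foldl_modify_append]
    simp [PySem.Dict.getD_empty]
  rw [hgetD]

/-- A's inner pass for prefix length `L` is the fold of `pvStep` over `pvPairs toks L`. -/
lemma pvInnerA (toks : List String) (Lz : Int) (L : Nat) (hLz : Lz = (L : Int)) (d : pvDS) :
    (PySem.List.pyRange 0 ((toks.length : Int) - Lz) 1).foldl
      (fun d ii =>
        PySem.Dict.modify d (PySem.List.slice toks (some ii) (some (ii + Lz))) []
          (fun x => x ++ [(PySem.List.pyGetD toks (ii + Lz) "",
            ((PySem.List.slice toks (some ii) (some (ii + Lz))).length : Int))]))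
      d
    = (pvPairs toks L).foldl pvStep d := by
  subst hLz
  rw [PySem.List.pyRange_one]
  unfold pvPairs
  rw [List.foldl_map, List.foldl_map]
  rw [show ((toks.length : Int) - (L : Int) - 0).toNat = toks.length - L from by omega]
  apply PySem.List.foldl_congr_mem
  intro acc ii hii
  have hii' : ii < toks.length - L := List.mem_range.mp hii
  have hsl : PySem.List.slice toks (some ((0 : Int) + (ii : Int)))
        (some ((0 : Int) + (ii : Int) + (L : Int)))
      = (toks.drop ii).take L := by
    rw [show (0 : Int) + (ii : Int) + (L : Int) = ((ii + L : Nat) : Int) from by push_cast; ring,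
      show (0 : Int) + (ii : Int) = ((ii : Nat) : Int) from by ring, PySem.List.slice_natCast]
    congr 1
    omega
  rw [hsl]
  simp only [show (0 : Int) + (ii : Int) + (L : Int) = ((ii + L : Nat) : Int) from by push_cast; ring,
    PySem.List.pyGetD_natCast, pvStep]
  rw [show ((toks.drop ii).take L).length = L from by
    simp only [List.length_take, List.length_drop]; omega]

/-- One `pvStep` with a key absent from `d` acts only on the `e` part of an appended dict. -/
lemma pvStep_append (d e : pvDS) (p : pvKV) (h : d.contains p.1 = false) :
    pvStep (PySem.Dict.mk (d.items ++ e.items)) p = PySem.Dict.mk (d.items ++ (pvStep e p).items) := by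
  have hany : (d.items.any fun q => q.1 == p.1) = false := by
    simpa [PySem.Dict.contains] using h
  have hnot : ∀ q ∈ d.items, (q.1 == p.1) = false := by
    intro q hq
    have := (List.any_eq_false.mp hany) q hq
    simpa using this
  have hfind : d.items.find? (fun q => q.1 == p.1) = none :=
    List.find?_eq_none.mpr (fun q hq => by simp [hnot q hq])
  have hmap : ∀ v : List (String × Int),
      d.items.map (fun q => if (q.1 == p.1) = true then (p.1, v) else q) = d.items := by
    intro v
    rw [List.map_congr_left (g := id) (fun q hq => by simp [hnot q hq]), List.map_id]
  simp only [pvStep, PySem.Dict.modify, PySem.Dict.getD, PySem.Dict.get?, PySem.Dict.insert,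
    PySem.Dict.contains, List.any_append, List.find?_append, hany, hfind,
    Bool.false_or, Option.none_or]
  by_cases hc : (e.items.any fun q => q.1 == p.1) = true
  · simp only [hc, if_true, List.map_append, hmap]
  · simp only [Bool.not_eq_true] at hc
    simp [hc, List.append_assoc]

lemma pvFoldl_step_append (l : List pvKV) (d : pvDS) :
    ∀ e : pvDS, (∀ p ∈ l, d.contains p.1 = false) →
    l.foldl pvStep (PySem.Dict.mk (d.items ++ e.items))
      = PySem.Dict.mk (d.items ++ (l.foldl pvStep e).items) := by
  induction l with
  | nil => intro e _; rfl
  | cons p l ih =>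
      intro e h
      simp only [List.foldl_cons]
      rw [pvStep_append d e p (h p (List.mem_cons_self ..))]
      exact ih _ (fun q hq => h q (List.mem_cons_of_mem _ hq))

lemma pvFoldl_step_fresh (l : List pvKV) (d : pvDS) (h : ∀ p ∈ l, d.contains p.1 = false) :
    l.foldl pvStep d = PySem.Dict.mk (d.items ++ (l.foldl pvStep PySem.Dict.empty).items) := by
  have := pvFoldl_step_append l d PySem.Dict.empty h
  simpa [PySem.Dict.empty] using this

/-- A dict all of whose keys have length ≠ L contains no key of `pvPairs toks L`. -/
lemma pvFresh (toks : List String) (L : Nat) (d : pvDS)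
    (h : ∀ k ∈ d.keys, k.length ≠ L) :
    ∀ p ∈ pvPairs toks L, d.contains p.1 = false := by
  intro p hp
  rw [PySem.Dict.contains_eq_decide_mem_keys]
  simp only [decide_eq_false_iff_not]
  intro hm
  exact h p.1 hm (pvKeyLen toks L p hp)

lemma pvA_items (toks : List String) :
    ([(0 : Int), 1, 2, 3].foldl
      (fun (d : pvDS) prefix_len =>
        (PySem.List.pyRange 0 ((toks.length : Int) - prefix_len) 1).foldl
          (fun d ii =>
            let pfx := PySem.List.slice toks (some ii) (some (ii + prefix_len))
            let next_word := PySem.List.pyGetD toks (ii + prefix_len) ""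
            d.modify pfx [] (· ++ [(next_word, (pfx.length : Int))]))
          d)
      PySem.Dict.empty).items = pvOut toks := by
  simp only [List.foldl_cons, List.foldl_nil]
  rw [pvInnerA toks 0 0 (by norm_num), pvInnerA toks 1 1 (by norm_num),
    pvInnerA toks 2 2 (by norm_num), pvInnerA toks 3 3 (by norm_num)]
  rw [show (pvPairs toks 0).foldl pvStep PySem.Dict.empty = pvP toks 0 from rfl]
  have g1 : ∀ p ∈ pvPairs toks 1, (pvP toks 0).contains p.1 = false :=
    pvFresh toks 1 _ (fun k hk => by
      obtain ⟨M, hM, hlen⟩ := pvKeysLen_of_items _ toks [0] (by simp [pvP_items]) k hk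
      fin_cases hM
      omega)
  rw [pvFoldl_step_fresh _ _ g1,
    show (pvPairs toks 1).foldl pvStep PySem.Dict.empty = pvP toks 1 from rfl]
  have g2 : ∀ p ∈ pvPairs toks 2,
      (PySem.Dict.mk ((pvP toks 0).items ++ (pvP toks 1).items)).contains p.1 = false :=
    pvFresh toks 2 _ (fun k hk => by
      obtain ⟨M, hM, hlen⟩ := pvKeysLen_of_items _ toks [0, 1] (by simp [pvP_items]) k hk
      fin_cases hM
      all_goals omega)
  rw [pvFoldl_step_fresh _ _ g2,
    show (pvPairs toks 2).foldl pvStep PySem.Dict.empty = pvP toks 2 from rfl]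
  have g3 : ∀ p ∈ pvPairs toks 3,
      (PySem.Dict.mk ((PySem.Dict.mk ((pvP toks 0).items ++ (pvP toks 1).items)).items
        ++ (pvP toks 2).items)).contains p.1 = false :=
    pvFresh toks 3 _ (fun k hk => by
      obtain ⟨M, hM, hlen⟩ := pvKeysLen_of_items _ toks [0, 1, 2] (by simp [pvP_items]) k hk
      fin_cases hM
      all_goals omega)
  rw [pvFoldl_step_fresh _ _ g3,
    show (pvPairs toks 3).foldl pvStep PySem.Dict.empty = pvP toks 3 from rfl]
  simp [pvOut, pvP_items, List.append_assoc]

-- ---------- B side ----------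

/-- B's gram list for level `L`, reindexed: it is the keys of A's pass-`L` pairs. -/
lemma pvGrams (toks : List String) (Lz : Int) (L : Nat) (hLz : Lz = (L : Int)) :
    (PySem.List.pyRange Lz (toks.length : Int) 1).map
        (fun j => PySem.List.slice toks (some (j - Lz)) (some j))
      = (pvPairs toks L).map Prod.fst := by
  subst hLz
  rw [PySem.List.pyRange_one]
  unfold pvPairs
  rw [List.map_map, List.map_map,
    show ((toks.length : Int) - (L : Int)).toNat = toks.length - L from by omega]
  apply List.map_congr_left
  intro k _
  show PySem.List.slice toks (some ((L : Int) + (k : Int) - (L : Int)))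
      (some ((L : Int) + (k : Int))) = (toks.drop k).take L
  rw [show (L : Int) + (k : Int) - (L : Int) = ((k : Nat) : Int) from by ring,
    show (L : Int) + (k : Int) = ((k + L : Nat) : Int) from by push_cast; ring,
    PySem.List.slice_natCast]
  congr 1
  omega

/-- B's comprehension for key `g` at level `L` is A's filtered pair list for `g`. -/
lemma pvVal (toks : List String) (Lz : Int) (L : Nat) (hLz : Lz = (L : Int)) (g : List String) :
    ((PySem.List.pyRange Lz (toks.length : Int) 1).filter
        (fun j => PySem.List.slice toks (some (j - Lz)) (some j) == g)).map
      (fun j => (PySem.List.pyGetD toks j "", Lz))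
    = ((pvPairs toks L).filter (fun p => p.1 == g)).map Prod.snd := by
  subst hLz
  rw [PySem.List.pyRange_one, List.filter_map, List.map_map]
  unfold pvPairs
  rw [List.filter_map, List.map_map,
    show ((toks.length : Int) - (L : Int)).toNat = toks.length - L from by omega]
  have hsl : ∀ k : Nat, PySem.List.slice toks (some ((L : Int) + (k : Int) - (L : Int)))
      (some ((L : Int) + (k : Int))) = (toks.drop k).take L := by
    intro k
    rw [show (L : Int) + (k : Int) - (L : Int) = ((k : Nat) : Int) from by ring,
      show (L : Int) + (k : Int) = ((k + L : Nat) : Int) from by push_cast; ring,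
      PySem.List.slice_natCast]
    congr 1
    omega
  have hfil : (List.range (toks.length - L)).filter
        ((fun j => PySem.List.slice toks (some (j - (L : Int))) (some j) == g) ∘
          (fun k : Nat => (L : Int) + (k : Int)))
      = (List.range (toks.length - L)).filter
        ((fun p : pvKV => p.1 == g) ∘
          (fun ii => ((toks.drop ii).take L, (toks.getD (ii + L) "", (L : Int))))) := by
    apply List.filter_congr
    intro k _
    simp only [Function.comp]
    rw [hsl k]
  rw [hfil]
  apply List.map_congr_left
  intro k _
  simp only [Function.comp]
  rw [show (L : Int) + (k : Int) = ((k + L : Nat) : Int) from by push_cast; ring,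
    PySem.List.pyGetD_natCast]

/-- B's level-`L` block appends `pvBlk toks L` to a dict whose keys all have length ≠ L. -/
lemma pvB_inner (toks : List String) (Lz : Int) (L : Nat) (hLz : Lz = (L : Int)) (d : pvDS)
    (hfresh : ∀ k ∈ d.keys, k.length ≠ L) :
    ((PySem.List.dedup ((PySem.List.pyRange Lz (toks.length : Int) 1).map
        (fun j => PySem.List.slice toks (some (j - Lz)) (some j)))).foldl
      (fun d g => d.insert g
        (((PySem.List.pyRange Lz (toks.length : Int) 1).filter
            (fun j => PySem.List.slice toks (some (j - Lz)) (some j) == g)).map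
          (fun j => (PySem.List.pyGetD toks j "", Lz))))
      d) = PySem.Dict.mk (d.items ++ pvBlk toks L) := by
  apply PySem.Dict.ext
  show _ = d.items ++ pvBlk toks L
  rw [pvGrams toks Lz L hLz]
  have hbody : ∀ (e : pvDS) (g : List String), e.insert g
      (((PySem.List.pyRange Lz (toks.length : Int) 1).filter
          (fun j => PySem.List.slice toks (some (j - Lz)) (some j) == g)).map
        (fun j => (PySem.List.pyGetD toks j "", Lz)))
      = e.insert g (((pvPairs toks L).filter (fun p => p.1 == g)).map Prod.snd) := by
    intro e g
    rw [pvVal toks Lz L hLz g]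
  rw [show (fun (e : pvDS) g => e.insert g
      (((PySem.List.pyRange Lz (toks.length : Int) 1).filter
          (fun j => PySem.List.slice toks (some (j - Lz)) (some j) == g)).map
        (fun j => (PySem.List.pyGetD toks j "", Lz))))
      = (fun (e : pvDS) g =>
          e.insert g (((pvPairs toks L).filter (fun p => p.1 == g)).map Prod.snd))
    from funext fun e => funext fun g => hbody e g]
  have hins := PySem.Dict.items_foldl_insert_fresh
      (PySem.List.dedup ((pvPairs toks L).map Prod.fst)) (fun g => g)
      (fun g => ((pvPairs toks L).filter (fun p => p.1 == g)).map Prod.snd) d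
    (by
      intro g hg
      rw [PySem.Dict.contains_eq_decide_mem_keys]
      simp only [decide_eq_false_iff_not]
      intro hm
      obtain ⟨p, hp, rfl⟩ :=
        List.mem_map.mp ((PySem.List.mem_dedup _ _).mp hg)
      exact hfresh p.1 hm (pvKeyLen toks L p hp))
    (by simp)
  rw [hins]
  unfold pvBlk
  rfl

lemma pvB_items (toks : List String) :
    ([(0 : Int), 1, 2, 3].foldl
      (fun (d : pvDS) L =>
        (PySem.List.dedup ((PySem.List.pyRange L (toks.length : Int) 1).map
            (fun j => PySem.List.slice toks (some (j - L)) (some j)))).foldl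
          (fun d g => d.insert g
            (((PySem.List.pyRange L (toks.length : Int) 1).filter
                (fun j => PySem.List.slice toks (some (j - L)) (some j) == g)).map
              (fun j => (PySem.List.pyGetD toks j "", L))))
          d)
      PySem.Dict.empty).items = pvOut toks := by
  simp only [List.foldl_cons, List.foldl_nil]
  rw [pvB_inner toks 0 0 (by norm_num) PySem.Dict.empty
    (by simp [PySem.Dict.keys_empty])]
  rw [pvB_inner toks 1 1 (by norm_num) _
    (fun k hk => by
      obtain ⟨M, hM, hlen⟩ := pvKeysLen_of_items _ toks [0]
        (by simp [PySem.Dict.empty]) k hk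
      fin_cases hM
      omega)]
  rw [pvB_inner toks 2 2 (by norm_num) _
    (fun k hk => by
      obtain ⟨M, hM, hlen⟩ := pvKeysLen_of_items _ toks [0, 1]
        (by simp [PySem.Dict.empty]) k hk
      fin_cases hM
      all_goals omega)]
  rw [pvB_inner toks 3 3 (by norm_num) _
    (fun k hk => by
      obtain ⟨M, hM, hlen⟩ := pvKeysLen_of_items _ toks [0, 1, 2]
        (by simp [PySem.Dict.empty]) k hk
      fin_cases hM
      all_goals omega)]
  simp [pvOut, PySem.Dict.empty, List.append_assoc]

theorem pv_main (line : String) :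
    make_subword_penalties line = make_subword_penalties_alt line :=
  (pvA_items (PySem.Str.split₀ (PySem.Str.replace line "<pad>" ""))).trans
    (pvB_items (PySem.Str.split₀ (PySem.Str.replace line "<pad>" ""))).symm

-- ===== VERDICT (by name: the statement is the Claim_ definition above) =====
theorem make_subword_penalties_spec : Claim_equal_make_subword_penalties := by
  intro line _
  unfold Spec_make_subword_penalties
  exact pv_main line
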